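-- pv_equiv track=rewrite | github.com/kelvinn/aoc2018 | days/day_2.py | solve_task_1
-- ===== SOURCE A (Python) =====
-- from collections import Counter
--
-- def solve_task_1(data):
--     two = 0
--     three = 0
--
--     for row in data.splitlines():
--         hist = Counter(row)
--         if list(hist.values()).count(2) >= 1: two += 1
--         if list(hist.values()).count(3) >= 1: three += 1
--     return two * three
-- ===== SOURCE B (Python) =====
-- def solve_task_1(data):
--     two = 0
--     three = 0
--     for row in data.splitlines():
--         s = sorted(row)
--         has2 = False
--         has3 = False
--         i = 0
--         n = len(s)
--         while i < n:
--             j = i + 1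
--             while j < n and s[j] == s[i]:
--                 j += 1
--             run = j - i
--             if run == 2:
--                 has2 = True
--             if run == 3:
--                 has3 = True
--             i = j
--         two += 1 if has2 else 0
--         three += 1 if has3 else 0
--     return two * three
-- ===== Notes on version B (the rewrite author's own statement) =====
-- stated objective: alternative
-- what changed: Replaces the per-row Counter hash histogram (and counting 2/3 among its values) with a sort-then-scan strategy: each row is sorted and its equal-character run lengths are measured in one scan, flagging a run of length exactly 2 or 3.
import Mathlib
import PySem

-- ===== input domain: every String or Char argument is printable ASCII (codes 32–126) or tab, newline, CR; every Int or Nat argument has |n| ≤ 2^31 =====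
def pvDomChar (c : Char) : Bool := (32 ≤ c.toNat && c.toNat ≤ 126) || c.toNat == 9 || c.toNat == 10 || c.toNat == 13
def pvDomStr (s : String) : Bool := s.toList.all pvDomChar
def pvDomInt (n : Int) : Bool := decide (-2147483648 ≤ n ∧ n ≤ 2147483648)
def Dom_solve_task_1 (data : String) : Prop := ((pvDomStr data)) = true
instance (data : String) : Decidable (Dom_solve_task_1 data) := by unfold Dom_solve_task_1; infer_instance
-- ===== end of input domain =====

-- B replaces A's per-row Counter histogram by sorting the row and scanning equal-character run
-- lengths (objective: alternative strategy, similar cost).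

-- ===== PORT A =====
-- for row in data.splitlines(): hist = Counter(row); two/three bumped when 2/3 occurs among hist.values()
def solve_task_1 (data : String) : Int :=
  let p := (PySem.Str.splitlines data).foldl
    (fun (acc : Int × Int) row =>
      let hist := PySem.Dict.counter row.toList
      let two := if PySem.List.count hist.values (2 : Int) ≥ 1 then acc.1 + 1 else acc.1
      let three := if PySem.List.count hist.values (3 : Int) ≥ 1 then acc.2 + 1 else acc.2
      (two, three))
    (0, 0)
  p.1 * p.2

-- ===== PORT B =====
-- the inner while loops of Source B: peel the leading run of equal characters, record whether a run
-- has length exactly 2 or exactly 3, continue after the run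
def runScan : List Char → Bool × Bool
  | [] => (false, false)
  | c :: rest =>
    let run := 1 + (rest.takeWhile (· == c)).length
    let p := runScan (rest.dropWhile (· == c))
    (p.1 || run == 2, p.2 || run == 3)
termination_by l => l.length
decreasing_by
  simpa using Nat.lt_succ_of_le (List.length_dropWhile_le (· == c) rest)

def solve_task_1_alt (data : String) : Int :=
  let p := (PySem.Str.splitlines data).foldl
    (fun (acc : Int × Int) row =>
      let f := runScan (PySem.List.sorted row.toList (fun x => x) false)
      (acc.1 + (if f.1 then 1 else 0), acc.2 + (if f.2 then 1 else 0)))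
    (0, 0)
  p.1 * p.2

-- ===== PRECONDITION & SPEC =====
def Spec_solve_task_1 (data : String) (out : Int) : Prop := out = solve_task_1_alt data
instance (data : String) (out : Int) : Decidable (Spec_solve_task_1 data out) := by unfold Spec_solve_task_1; infer_instance

-- ===== CLAIM (what is proved, stated in full; the proofs are below) =====
def Claim_equal_solve_task_1 : Prop := ∀ (data : String), Dom_solve_task_1 data → Spec_solve_task_1 data (solve_task_1 data)

-- ===== LEMMAS AND PROOFS =====


-- A-side: m (> 0) occurs among the Counter's values iff some character occurs exactly m times
theorem counter_values_count_pos (m : Nat) (hm : 0 < m) (xs : List Char) :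
    (PySem.List.count (PySem.Dict.counter xs).values ((m : Nat) : Int) ≥ 1) ↔ ∃ c, xs.count c = m := by
  rw [ge_iff_le, PySem.List.count_eq, Nat.one_le_iff_ne_zero, Ne, List.count_eq_zero, not_not]
  have hv : (PySem.Dict.counter xs).values
      = (PySem.Set.ofList xs).map (fun k => ((xs.count k : Nat) : Int)) := by
    have h := PySem.Dict.items_counter (κ := Char) xs
    simp [PySem.Dict.values, h, List.map_map, Function.comp_def]
  rw [hv]
  constructor
  · intro h
    rcases List.mem_map.mp h with ⟨c, _, hc⟩
    refine ⟨c, ?_⟩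
    have h' : ((xs.count c : Nat) : Int) = ((m : Nat) : Int) := hc
    exact_mod_cast h'
  · rintro ⟨c, hc⟩
    have hmem : c ∈ xs := List.count_pos_iff.mp (hc ▸ hm)
    exact List.mem_map.mpr ⟨c, by simpa [PySem.Set.mem_ofList] using hmem, by simp [hc]⟩

-- in a sorted list c :: rest, no c remains after the leading run of c's
theorem count_dropWhile_self (c : Char) (rest : List Char)
    (h : (c :: rest).Pairwise (· ≤ ·)) :
    (rest.dropWhile (· == c)).count c = 0 := by
  apply List.count_eq_zero.mpr
  intro hcmem
  have hsub : (rest.dropWhile (· == c)).Sublist rest := List.dropWhile_sublist _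
  cases hd : rest.dropWhile (· == c) with
  | nil => simp [hd] at hcmem
  | cons a u =>
    have hane : ¬ (a == c) = true := by
      have := List.head?_dropWhile_not (· == c) rest
      rw [hd] at this; simpa using this
    have halec : c ≤ a := by
      have := List.pairwise_cons.mp h
      exact this.1 a (hsub.mem (hd ▸ List.mem_cons_self))
    have hclt : c < a := lt_of_le_of_ne halec (fun he => hane (by simp [he.symm]))
    rw [hd] at hcmem hsub
    rcases List.mem_cons.mp hcmem with he | hu
    · exact hane (by simp [he])
    · have hpu : (a :: u).Pairwise (· ≤ ·) := (List.pairwise_cons.mp h).2.sublist hsub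
      have : a ≤ c := (List.pairwise_cons.mp hpu).1 c hu
      exact absurd (lt_of_lt_of_le hclt this) (lt_irrefl c)

-- any character other than c keeps its count across dropping the leading run of c's
theorem count_dropWhile_other (c d : Char) (hne : d ≠ c) (rest : List Char) :
    (rest.dropWhile (· == c)).count d = rest.count d := by
  conv_rhs => rw [← List.takeWhile_append_dropWhile (p := (· == c)) (l := rest)]
  rw [List.count_append]
  have : (rest.takeWhile (· == c)).count d = 0 := by
    apply List.count_eq_zero.mpr
    intro hmem
    have := List.mem_takeWhile_imp hmem
    exact hne (by simpa using this)
  omega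

-- length of the leading run = total count, in a sorted list
theorem takeWhile_length_eq_count (c : Char) (rest : List Char)
    (h : (c :: rest).Pairwise (· ≤ ·)) :
    (rest.takeWhile (· == c)).length = rest.count c := by
  have hsplit : rest.count c = (rest.takeWhile (· == c)).count c + (rest.dropWhile (· == c)).count c := by
    conv_lhs => rw [← List.takeWhile_append_dropWhile (p := (· == c)) (l := rest)]
    exact List.count_append ..
  have htake : (rest.takeWhile (· == c)).count c = (rest.takeWhile (· == c)).length := by
    apply List.count_eq_length.mpr
    intro a ha
    have hb := List.mem_takeWhile_imp (p := fun x => x == c) ha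
    simp only [beq_iff_eq] at hb
    exact hb.symm
  have hdrop := count_dropWhile_self c rest h
  omega

-- B-side characterisation: runScan on a sorted list flags exactly-2 / exactly-3 occurrences
theorem runScan_spec (l : List Char) (h : l.Pairwise (· ≤ ·)) :
    ((runScan l).1 = true ↔ ∃ c, l.count c = 2) ∧ ((runScan l).2 = true ↔ ∃ c, l.count c = 3) := by
  induction l using runScan.induct with
  | case1 => simp [runScan]
  | case2 c rest ih =>
    have hpd : (rest.dropWhile (· == c)).Pairwise (· ≤ ·) :=
      ((List.pairwise_cons.mp h).2).sublist (List.dropWhile_sublist _)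
    have ih' := ih hpd
    have hrun : 1 + (rest.takeWhile (· == c)).length = (c :: rest).count c := by
      rw [takeWhile_length_eq_count c rest h, List.count_cons_self]; omega
    have hex : ∀ m : Nat, 0 < m →
        (((∃ x, (rest.dropWhile (· == c)).count x = m) ∨ (c :: rest).count c = m) ↔
          (∃ x, (c :: rest).count x = m)) := by
      intro m hm
      constructor
      · rintro (⟨x, hx⟩ | hc)
        · rcases eq_or_ne x c with rfl | hne
          · have := count_dropWhile_self x rest h; omega
          · refine ⟨x, ?_⟩
            have h1 := count_dropWhile_other c x hne rest
            have h2 : (c :: rest).count x = rest.count x := by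
              simp [Ne.symm hne]
            omega
        · exact ⟨c, hc⟩
      · rintro ⟨x, hx⟩
        rcases eq_or_ne x c with rfl | hne
        · exact Or.inr hx
        · refine Or.inl ⟨x, ?_⟩
          have h1 := count_dropWhile_other c x hne rest
          have h2 : (c :: rest).count x = rest.count x := by
            simp [Ne.symm hne]
          omega
    have hunfold : runScan (c :: rest)
        = ((runScan (rest.dropWhile (· == c))).1 || (1 + (rest.takeWhile (· == c)).length == 2),
           (runScan (rest.dropWhile (· == c))).2 || (1 + (rest.takeWhile (· == c)).length == 3)) := by
      rw [runScan]
    constructor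
    · rw [hunfold]
      simp only [Bool.or_eq_true, beq_iff_eq, ih'.1, hrun]
      rw [← hex 2 (by omega)]
    · rw [hunfold]
      simp only [Bool.or_eq_true, beq_iff_eq, ih'.2, hrun]
      rw [← hex 3 (by omega)]

-- per-row agreement of the two loop bodies
theorem row_step_eq (acc : Int × Int) (row : String) :
    (let hist := PySem.Dict.counter row.toList
     let two := if PySem.List.count hist.values (2 : Int) ≥ 1 then acc.1 + 1 else acc.1
     let three := if PySem.List.count hist.values (3 : Int) ≥ 1 then acc.2 + 1 else acc.2
     ((two, three) : Int × Int))
    = (let f := runScan (PySem.List.sorted row.toList (fun x => x) false)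
       (acc.1 + (if f.1 then 1 else 0), acc.2 + (if f.2 then 1 else 0))) := by
  have hperm := PySem.List.sorted_perm row.toList (fun x => x) false
  have hp : (PySem.List.sorted row.toList (fun x => x) false).Pairwise (· ≤ ·) :=
    PySem.List.sorted_pairwise row.toList (fun x => x)
  have hs := runScan_spec _ hp
  have h2 : (PySem.List.count (PySem.Dict.counter row.toList).values (2 : Int) ≥ 1)
      ↔ (runScan (PySem.List.sorted row.toList (fun x => x) false)).1 = true := by
    rw [show ((2:Int)) = ((2:Nat):Int) from rfl]
    rw [counter_values_count_pos 2 (by omega), hs.1]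
    exact exists_congr (fun c => by rw [hperm.count_eq])
  have h3 : (PySem.List.count (PySem.Dict.counter row.toList).values (3 : Int) ≥ 1)
      ↔ (runScan (PySem.List.sorted row.toList (fun x => x) false)).2 = true := by
    rw [show ((3:Int)) = ((3:Nat):Int) from rfl]
    rw [counter_values_count_pos 3 (by omega), hs.2]
    exact exists_congr (fun c => by rw [hperm.count_eq])
  show (_, _) = ((_, _) : Int × Int)
  refine Prod.ext ?_ ?_
  · by_cases hb : (runScan (PySem.List.sorted row.toList (fun x => x) false)).1 = true
    · rw [if_pos (h2.mpr hb), hb]; simp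
    · have hb' : (runScan (PySem.List.sorted row.toList (fun x => x) false)).1 = false :=
        Bool.eq_false_iff.mpr hb
      rw [if_neg (fun hc => hb (h2.mp hc)), hb']; simp
  · by_cases hb : (runScan (PySem.List.sorted row.toList (fun x => x) false)).2 = true
    · rw [if_pos (h3.mpr hb), hb]; simp
    · have hb' : (runScan (PySem.List.sorted row.toList (fun x => x) false)).2 = false :=
        Bool.eq_false_iff.mpr hb
      rw [if_neg (fun hc => hb (h3.mp hc)), hb']; simp

-- ===== VERDICT (by name: the statement is the Claim_ definition above) =====
theorem solve_task_1_spec : Claim_equal_solve_task_1 := by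
  intro data _
  unfold Spec_solve_task_1 solve_task_1 solve_task_1_alt
  have hfold : ∀ (rows : List String) (acc : Int × Int),
      rows.foldl (fun (acc : Int × Int) row =>
        let hist := PySem.Dict.counter row.toList
        let two := if PySem.List.count hist.values (2 : Int) ≥ 1 then acc.1 + 1 else acc.1
        let three := if PySem.List.count hist.values (3 : Int) ≥ 1 then acc.2 + 1 else acc.2
        (two, three)) acc
      = rows.foldl (fun (acc : Int × Int) row =>
        let f := runScan (PySem.List.sorted row.toList (fun x => x) false)
        (acc.1 + (if f.1 then 1 else 0), acc.2 + (if f.2 then 1 else 0))) acc := by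
    intro rows
    induction rows with
    | nil => intro acc; rfl
    | cons r rs ihr => intro acc; simp only [List.foldl_cons, row_step_eq acc r]; exact ihr _
  simp only [hfold]
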